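-- pv_equiv track=rewrite | github.com/haplm/tidradio | app.py | calculate_settings_checksum
-- ===== SOURCE A (Python) =====
-- def calculate_settings_checksum(settings_data):
--     """Calculate the checksum for the settings block."""
--     # Skip the magic value itself in calculation
--     data_bytes = settings_data[2:]  # Skip first 2 bytes (magic value)
--
--     # Simple additive checksum using BIG-Endian byte order
--     checksum = 0
--     for i in range(0, len(data_bytes), 2):
--         if i + 1 < len(data_bytes):
--             # BIG-Endian: most significant byte first
--             value = (data_bytes[i] << 8) | data_bytes[i + 1]
--         else:
--             value = data_bytes[i] << 8
--         checksum = (checksum + value) & 0xFFFF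
--
--     return checksum
-- ===== SOURCE B (Python) =====
-- def calculate_settings_checksum(settings_data):
--     """Checksum of the settings block: a streaming byte-at-a-time state machine.
--     Instead of striding over indices two at a time, walk the bytes one by one,
--     holding each would-be high byte in a 'pending' register until its low
--     partner arrives; an unpaired pending byte at the end is a high byte with no
--     partner. The 16-bit mask is applied once at the end (addition is modular)."""
--     total = 0
--     pending = None
--     for byte in settings_data[2:]:
--         if pending is None:
--             pending = byte
--         else:
--             total += (pending << 8) | byte
--             pending = None
--     if pending is not None:
--         total += pending << 8
--     return total & 0xFFFF
-- ===== Notes on version B (the rewrite author's own statement) =====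
-- stated objective: alternative
-- what changed: Replaces A's index-stride loop (range(0,len,2), per-iteration bounds test and per-iteration 16-bit mask) with an index-free streaming state machine that consumes one byte at a time, holding each high byte in a 'pending' register until its partner arrives, and masks once at the end.
import Mathlib
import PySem

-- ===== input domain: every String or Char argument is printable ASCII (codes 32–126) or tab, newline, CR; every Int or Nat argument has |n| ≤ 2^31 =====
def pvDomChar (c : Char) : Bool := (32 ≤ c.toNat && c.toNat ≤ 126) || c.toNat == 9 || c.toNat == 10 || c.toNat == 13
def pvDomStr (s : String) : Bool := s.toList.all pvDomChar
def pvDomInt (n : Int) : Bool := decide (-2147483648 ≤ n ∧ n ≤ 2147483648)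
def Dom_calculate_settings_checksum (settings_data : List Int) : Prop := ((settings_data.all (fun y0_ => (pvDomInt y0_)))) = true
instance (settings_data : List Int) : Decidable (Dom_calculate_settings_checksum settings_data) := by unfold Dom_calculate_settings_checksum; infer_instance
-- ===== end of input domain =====

-- B replaces A's index-stride loop (with its per-iteration bounds test and mask) by an
-- index-free streaming state machine holding a pending high byte, masking once at the end;
-- equal return value on every input.

-- ===== PORT A =====
-- loop body of A's 'for i in range(0, len(data_bytes), 2)'
def pvStepA (data : List Int) (checksum i : Int) : Int :=
  let value :=
    if i + 1 < (data.length : Int) then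
      PySem.Int.bor (PySem.List.pyGetD data i 0 <<< (8:Nat)) (PySem.List.pyGetD data (i+1) 0)
    else
      PySem.List.pyGetD data i 0 <<< (8:Nat)
  PySem.Int.band (checksum + value) 65535

def calculate_settings_checksum (settings_data : List Int) : Int :=
  let data_bytes := PySem.List.slice settings_data (some 2) none
  (PySem.List.pyRange 0 (data_bytes.length : Int) 2).foldl (pvStepA data_bytes) 0

-- ===== PORT B =====
-- B's loop body: state (total, pending); a byte either becomes pending or closes a pair
def pvStepB (acc : Int × Option Int) (byte : Int) : Int × Option Int :=
  match acc.2 with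
  | none => (acc.1, some byte)
  | some p => (acc.1 + PySem.Int.bor (p <<< (8:Nat)) byte, none)

def calculate_settings_checksum_alt (settings_data : List Int) : Int :=
  let st := (PySem.List.slice settings_data (some 2) none).foldl pvStepB (0, none)
  let total := match st.2 with
    | some p => st.1 + p <<< (8:Nat)
    | none => st.1
  PySem.Int.band total 65535

-- ===== PRECONDITION & SPEC =====
def Spec_calculate_settings_checksum (settings_data : List Int) (out : Int) : Prop := out = calculate_settings_checksum_alt settings_data
instance (settings_data : List Int) (out : Int) : Decidable (Spec_calculate_settings_checksum settings_data out) := by unfold Spec_calculate_settings_checksum; infer_instance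

-- ===== CLAIM (what is proved, stated in full; the proofs are below) =====
def Claim_equal_calculate_settings_checksum : Prop := ∀ (settings_data : List Int), Dom_calculate_settings_checksum settings_data → Spec_calculate_settings_checksum settings_data (calculate_settings_checksum settings_data)

-- ===== LEMMAS AND PROOFS =====

-- Python's '& 0xFFFF' is reduction mod 2^16
theorem pv_band_mask (x : Int) : PySem.Int.band x 65535 = x % 65536 := by
  unfold PySem.Int.band
  have h255 : ((65535 : Int)).toNat = 2 ^ 16 - 1 := rfl
  have hpow : (2:Nat) ^ 16 = 65536 := by norm_num
  by_cases hx : 0 ≤ x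
  · simp only [hx, if_true, show (0:Int) ≤ 65535 by norm_num, h255]
    rw [Nat.and_two_pow_sub_one_eq_mod x.toNat 16, hpow]
    omega
  · simp only [hx, if_false, show (0:Int) ≤ 65535 by norm_num, if_true, h255]
    rw [Nat.land_comm, Nat.and_two_pow_sub_one_eq_mod (-x - 1).toNat 16, hpow]
    omega

-- the raw (unmasked) big-endian word sum, the common value of both programs
def pvRaw : List Int → Int
  | a :: b :: rest => PySem.Int.bor (a <<< (8:Nat)) b + pvRaw rest
  | [a] => a <<< (8:Nat)
  | [] => 0

-- B's streaming fold, finalized with its pending high byte, is the raw word sum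
theorem pvFoldB_eq : ∀ (data : List Int) (t : Int),
    (match (data.foldl pvStepB (t, none)).2 with
      | some p => (data.foldl pvStepB (t, none)).1 + p <<< (8:Nat)
      | none => (data.foldl pvStepB (t, none)).1)
    = t + pvRaw data
  | [], t => by simp [pvRaw]
  | [a], t => by simp [pvStepB, pvRaw]
  | a :: b :: rest, t => by
      have ih := pvFoldB_eq rest (t + PySem.Int.bor (a <<< (8:Nat)) b)
      simp only [List.foldl_cons, pvStepB] at ih ⊢
      rw [ih]
      simp only [pvRaw]
      ring

-- range(0, n, 2) starts with index 0 when n > 0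
theorem pv_pyRange2_cons (n : Int) (h : 0 < n) :
    PySem.List.pyRange 0 n 2 = 0 :: PySem.List.pyRange 2 n 2 := by
  rw [PySem.List.pyRange_of_pos 0 n (by norm_num), PySem.List.pyRange_of_pos 2 n (by norm_num)]
  by_cases h2 : 2 < n
  · have hm : ((n - 0 + 2 - 1) / 2).toNat = ((n - 2 + 2 - 1) / 2).toNat + 1 := by omega
    rw [if_pos h, if_pos h2, hm, List.range_succ_eq_map, List.map_cons, List.map_map]
    refine congrArg₂ _ (by ring) (List.map_congr_left fun k _ => ?_)
    simp only [Function.comp]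
    push_cast
    ring
  · have hm : ((n - 0 + 2 - 1) / 2).toNat = 1 := by omega
    rw [if_pos h, if_neg h2, hm]
    simp

-- A's loop body after the first pair is A's loop body on the remaining list
theorem pv_shift (a b : Int) (rest : List Int) (c : Int) :
    (PySem.List.pyRange 2 ((rest.length : Int) + 2) 2).foldl (pvStepA (a :: b :: rest)) c
      = (PySem.List.pyRange 0 (rest.length : Int) 2).foldl (pvStepA rest) c := by
  rw [PySem.List.pyRange_of_pos 2 _ (by norm_num), PySem.List.pyRange_of_pos 0 _ (by norm_num)]
  have hif : (if (2:Int) < (rest.length : Int) + 2 then (((rest.length : Int) + 2 - 2 + 2 - 1) / 2).toNat else 0)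
      = (if (0:Int) < (rest.length : Int) then (((rest.length : Int) - 0 + 2 - 1) / 2).toNat else 0) := by
    by_cases h0 : (0:Int) < (rest.length : Int)
    · rw [if_pos (by omega), if_pos h0]; omega
    · rw [if_neg (by omega), if_neg h0]
  rw [hif, List.foldl_map, List.foldl_map]
  have hfun : (fun (acc : Int) (k : Nat) => pvStepA (a :: b :: rest) acc (2 + 2 * (k:Int)))
      = (fun (acc : Int) (k : Nat) => pvStepA rest acc (0 + 2 * (k:Int))) := by
    funext acc k
    unfold pvStepA
    have e1 : (2:Int) + 2 * (k:Int) = ((2 + 2 * k : Nat) : Int) := by push_cast; ring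
    have e2 : (2:Int) + 2 * (k:Int) + 1 = ((3 + 2 * k : Nat) : Int) := by push_cast; ring
    have e3 : (0:Int) + 2 * (k:Int) = ((2 * k : Nat) : Int) := by push_cast; ring
    have e4 : (0:Int) + 2 * (k:Int) + 1 = ((2 * k + 1 : Nat) : Int) := by push_cast; ring
    rw [e2, e1, e4, e3]
    simp only [PySem.List.pyGetD_natCast]
    have g1 : (a :: b :: rest).getD (2 + 2 * k) 0 = rest.getD (2 * k) 0 := by
      rw [show 2 + 2 * k = (2 * k + 1) + 1 from by omega, List.getD_cons_succ, List.getD_cons_succ]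
    have g2 : (a :: b :: rest).getD (3 + 2 * k) 0 = rest.getD (2 * k + 1) 0 := by
      rw [show 3 + 2 * k = (2 * k + 1 + 1) + 1 from by omega, List.getD_cons_succ, List.getD_cons_succ]
    rw [g1, g2]
    simp only [List.length_cons]
    by_cases hlt : ((2 * k + 1 : Nat) : Int) < (rest.length : Int)
    · rw [if_pos (by push_cast at hlt ⊢; omega), if_pos (by simpa using hlt)]
    · rw [if_neg (by push_cast at hlt ⊢; omega), if_neg (by simpa using hlt)]
  rw [hfun]

theorem pv_main : ∀ (data : List Int) (c : Int), 0 ≤ c → c < 65536 →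
    (PySem.List.pyRange 0 (data.length : Int) 2).foldl (pvStepA data) c
      = if data = [] then c else (c + pvRaw data) % 65536
  | [], c, _, _ => by
      simp only [List.length_nil, Int.natCast_zero]
      rw [PySem.List.pyRange_of_pos 0 0 (by norm_num)]
      simp
  | [a], c, h0, h1 => by
      simp only [List.length_cons, List.length_nil]
      rw [show ((0 + 1 : Nat) : Int) = 1 from by norm_num,
          PySem.List.pyRange_of_pos 0 1 (by norm_num)]
      norm_num [pvStepA, pvRaw, PySem.List.pyGetD_zero_cons, pv_band_mask]
  | a :: b :: rest, c, h0, h1 => by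
      have hcast : (((a :: b :: rest).length : Nat) : Int) = (rest.length : Int) + 2 := by
        simp [List.length_cons]; ring
      rw [hcast, pv_pyRange2_cons _ (by omega), List.foldl_cons]
      have hc' : pvStepA (a :: b :: rest) c 0
          = (c + PySem.Int.bor (a <<< (8:Nat)) b) % 65536 := by
        unfold pvStepA
        rw [if_pos (by simp only [List.length_cons]; push_cast; omega)]
        have i1 : ((0:Int) + 1) = ((1 : Nat) : Int) := by norm_num
        rw [i1, PySem.List.pyGetD_natCast]
        simp only [PySem.List.pyGetD_zero_cons, List.getD_cons_succ, List.getD_cons_zero]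
        exact pv_band_mask _
      have hrw : (PySem.List.pyRange 2 ((rest.length : Int) + 2) 2).foldl
            (pvStepA (a :: b :: rest)) (pvStepA (a :: b :: rest) c 0)
          = (PySem.List.pyRange 0 (rest.length : Int) 2).foldl (pvStepA rest)
            ((c + PySem.Int.bor (a <<< (8:Nat)) b) % 65536) := by
        rw [pv_shift, hc']
      rw [hrw, pv_main rest _ (Int.emod_nonneg _ (by norm_num)) (Int.emod_lt_of_pos _ (by norm_num))]
      rcases rest with _ | ⟨x, xs⟩
      · simp [pvRaw]
      · rw [if_neg (by simp), if_neg (by simp)]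
        simp only [pvRaw]
        omega

-- B's port beta-reduced: it computes the masked raw word sum
theorem pv_alt_eq (s : List Int) :
    calculate_settings_checksum_alt s
      = PySem.Int.band (pvRaw (PySem.List.slice s (some 2) none)) 65535 := by
  unfold calculate_settings_checksum_alt
  have := pvFoldB_eq (PySem.List.slice s (some 2) none) 0
  simp only [zero_add] at this
  simp only [this]

-- ===== VERDICT (by name: the statement is the Claim_ definition above) =====
theorem calculate_settings_checksum_spec : Claim_equal_calculate_settings_checksum := by
  intro settings_data _
  unfold Spec_calculate_settings_checksum
  rw [pv_alt_eq]
  unfold calculate_settings_checksum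
  rw [pv_main _ 0 le_rfl (by norm_num), pv_band_mask]
  rcases h : PySem.List.slice settings_data (some 2) none with _ | ⟨a, rest⟩
  · simp [pvRaw]
  · rw [if_neg (by simp), zero_add]
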